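-- pv_equiv track=rewrite | github.com/inthesunset/Email-Counter | app.py | email_count
-- ===== SOURCE A (Python) =====
-- def email_count(emails):
--     # no multiple @, only one @ is allowed
--     ret = 0
--     email_set = set()
--     for email in emails.strip().split():
--         if '@' not in email:
--             return email + ' is invalid, require @'
--         if len(email.split('@')) > 2:
--             return email + ' is invalid, only one @ is allowed'
--         if not email.split('@')[0] or not email.split('@')[1]:
--             return email + ' is invalid, characters must appear before and after @ sign'
--         purified_email = ''
--         for i, char in enumerate(email):
--             if char not in ('.', '+', '@'):
--                 purified_email += char
--             elif char == '@':
--                 purified_email += email[i:]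
--                 break
--             elif char == '.':
--                 continue
--             elif char == '+':
--                 purified_email += '@' + email.split('@')[1]
--                 break
--         if purified_email not in  email_set:
--             email_set.add(purified_email)
--     return 'We found ' + str(len(email_set)) + ' unique email(s)'
-- ===== SOURCE B (Python) =====
-- def email_count(emails):
--     seen = set()
--     for email in emails.strip().split():
--         if '@' not in email:
--             return email + ' is invalid, require @'
--         parts = email.split('@')
--         if len(parts) > 2:
--             return email + ' is invalid, only one @ is allowed'
--         local, domain = parts
--         if not local or not domain:
--             return email + ' is invalid, characters must appear before and after @ sign'
--         seen.add(local.split('+')[0].replace('.', '') + '@' + domain)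
--     return 'We found ' + str(len(seen)) + ' unique email(s)'
-- ===== Notes on version B (the rewrite author's own statement) =====
-- stated objective: simpler
-- what changed: A's indexed character loop with break/continue that normalizes each token is replaced by string operations on one split at the separator: the local part is cut at its first plus sign, dots are removed from it, and it is rejoined with the untouched domain; validation order and error strings are unchanged.
import Mathlib
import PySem

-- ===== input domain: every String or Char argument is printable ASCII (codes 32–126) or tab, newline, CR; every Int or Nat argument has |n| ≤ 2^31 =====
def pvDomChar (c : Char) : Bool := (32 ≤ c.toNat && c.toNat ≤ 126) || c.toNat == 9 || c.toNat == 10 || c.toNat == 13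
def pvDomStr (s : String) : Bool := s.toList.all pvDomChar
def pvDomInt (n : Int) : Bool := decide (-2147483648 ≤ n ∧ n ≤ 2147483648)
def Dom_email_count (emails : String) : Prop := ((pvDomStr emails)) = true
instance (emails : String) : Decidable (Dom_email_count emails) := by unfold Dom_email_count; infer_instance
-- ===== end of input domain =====

-- B replaces A's indexed character loop (break/continue) for normalizing each email by string
-- operations on one split: local.split('+')[0].replace('.','') + '@' + domain; validation,
-- error strings and the returned count are unchanged (objective: simpler).

-- ===== PORT A =====
-- inner 'for i, char in enumerate(email)' loop of A, with break as early return
def pvLoopA (email : List Char) : List (Int × Char) → List Char → List Char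
  | [], acc => acc
  | (i, c) :: rest, acc =>
    if c ≠ '.' ∧ c ≠ '+' ∧ c ≠ '@' then pvLoopA email rest (acc ++ [c])
    else if c = '@' then acc ++ PySem.List.slice email (some i) none
    else if c = '.' then pvLoopA email rest acc
    else acc ++ '@' :: PySem.List.pyGetD (PySem.Chars.splitOn email ['@']) 1 []

-- outer 'for email in emails.strip().split()' loop of A
def pvGoA : List (List Char) → PySem.Set (List Char) → String
  | [], s => String.ofList ("We found ".toList ++ PySem.Int.toChars (PySem.Set.len s) ++ " unique email(s)".toList)
  | e :: rest, s =>
    if PySem.Chars.isIn ['@'] e = false then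
      String.ofList (e ++ " is invalid, require @".toList)
    else if (PySem.Chars.splitOn e ['@']).length > 2 then
      String.ofList (e ++ " is invalid, only one @ is allowed".toList)
    else if PySem.List.pyGetD (PySem.Chars.splitOn e ['@']) 0 [] = [] ∨
            PySem.List.pyGetD (PySem.Chars.splitOn e ['@']) 1 [] = [] then
      String.ofList (e ++ " is invalid, characters must appear before and after @ sign".toList)
    else
      let purified := pvLoopA e (PySem.List.enumerate e 0) []
      if PySem.Set.contains s purified then pvGoA rest s
      else pvGoA rest (PySem.Set.add s purified)

def email_count (emails : String) : String :=
  pvGoA (PySem.Chars.split₀ (PySem.Chars.strip emails.toList)) PySem.Set.empty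

-- ===== PORT B =====
-- outer loop of B; normalization is split('@') once, then split('+')[0].replace('.','')
def pvGoB : List (List Char) → PySem.Set (List Char) → String
  | [], s => String.ofList ("We found ".toList ++ PySem.Int.toChars (PySem.Set.len s) ++ " unique email(s)".toList)
  | e :: rest, s =>
    if PySem.Chars.isIn ['@'] e = false then
      String.ofList (e ++ " is invalid, require @".toList)
    else
      let parts := PySem.Chars.splitOn e ['@']
      if parts.length > 2 then
        String.ofList (e ++ " is invalid, only one @ is allowed".toList)
      else
        let lcl := PySem.List.pyGetD parts 0 []
        let dom := PySem.List.pyGetD parts 1 []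
        if lcl = [] ∨ dom = [] then
          String.ofList (e ++ " is invalid, characters must appear before and after @ sign".toList)
        else
          pvGoB rest (PySem.Set.add s
            (PySem.Chars.replace (PySem.List.pyGetD (PySem.Chars.splitOn lcl ['+']) 0 []) ['.'] []
              ++ '@' :: dom))

def email_count_alt (emails : String) : String :=
  pvGoB (PySem.Chars.split₀ (PySem.Chars.strip emails.toList)) PySem.Set.empty

-- ===== PRECONDITION & SPEC =====
def Spec_email_count (emails : String) (out : String) : Prop := out = email_count_alt emails
instance (emails : String) (out : String) : Decidable (Spec_email_count emails out) := by unfold Spec_email_count; infer_instance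

-- ===== CLAIM (what is proved, stated in full; the proofs are below) =====
def Claim_equal_email_count : Prop := ∀ (emails : String), Dom_email_count emails → Spec_email_count emails (email_count emails)

-- ===== LEMMAS AND PROOFS =====

-- structural model of s.split(c) for a one-character separator
def pvSplit1 (c : Char) : List Char → List (List Char)
  | [] => [[]]
  | x :: t => if x = c then [] :: pvSplit1 c t else (pvSplit1 c t).modifyHead (x :: ·)

theorem pvSplit1_ne_nil (c : Char) : ∀ l : List Char, pvSplit1 c l ≠ []
  | [] => by simp [pvSplit1]
  | x :: t => by
    simp only [pvSplit1]
    split_ifs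
    · simp
    · cases h : pvSplit1 c t with
      | nil => exact absurd h (pvSplit1_ne_nil c t)
      | cons a b => simp

theorem pvReplace_go_eq (c : Char) (fuel : Nat) (l acc : List Char)
    (h : l.length ≤ fuel) :
    PySem.Chars.replace.go [c] [] fuel l acc = acc.reverse ++ l.filter (· ≠ c) := by
  induction fuel generalizing l acc with
  | zero =>
    cases l with
    | nil => simp [PySem.Chars.replace.go]
    | cons x t => simp at h
  | succ f ih =>
    cases l with
    | nil => simp [PySem.Chars.replace.go]
    | cons x t =>
      rw [PySem.Chars.replace.go]
      by_cases hx : x = c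
      · subst hx
        rw [if_pos (by simp [List.isPrefixOf])]
        have hd : List.drop (List.length [x]) (x :: t) = t := rfl
        rw [hd]
        rw [show ([] : List Char).reverse ++ acc = acc from by simp]
        rw [ih t acc (by simpa using Nat.le_of_succ_le_succ h)]
        simp
      · rw [if_neg (by simp [List.isPrefixOf]; exact fun hh => absurd hh.symm hx)]
        rw [ih t (x :: acc) (by simpa using Nat.le_of_succ_le_succ h)]
        simp [hx]

theorem pvReplace_eq (c : Char) (l : List Char) :
    PySem.Chars.replace l [c] [] = l.filter (· ≠ c) := by
  rw [PySem.Chars.replace]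
  rw [if_neg (by simp)]
  simpa using pvReplace_go_eq c l.length l []  (le_refl _)

theorem pvSplit1_head (c : Char) (l : List Char) :
    ∃ t, pvSplit1 c l = l.takeWhile (fun x => x ≠ c) :: t := by
  induction l with
  | nil => exact ⟨[], rfl⟩
  | cons x t ih =>
    obtain ⟨tt, htt⟩ := ih
    by_cases hx : x = c
    · subst hx
      exact ⟨pvSplit1 x t, by simp [pvSplit1, List.takeWhile]⟩
    · refine ⟨tt, ?_⟩
      simp only [pvSplit1, if_neg hx, htt]
      simp [List.takeWhile, hx, List.modifyHead]

theorem pvSplit1_singleton (c : Char) : ∀ (e d : List Char),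
    pvSplit1 c e = [d] → e = d ∧ c ∉ d := by
  intro e
  induction e with
  | nil =>
    intro d h
    have hd : d = [] := by simpa [pvSplit1] using h.symm
    subst hd; exact ⟨rfl, by simp⟩
  | cons x t ih =>
    intro d h
    by_cases hx : x = c
    · subst hx
      rw [show pvSplit1 x (x :: t) = [] :: pvSplit1 x t from by simp [pvSplit1]] at h
      injection h with h1 h2
      exact absurd h2 (pvSplit1_ne_nil x t)
    · simp only [pvSplit1, if_neg hx] at h
      cases hsp : pvSplit1 c t with
      | nil => rw [hsp] at h; simp at h
      | cons a b =>
        rw [hsp] at h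
        simp [List.modifyHead] at h
        obtain ⟨hd, hb⟩ := h
        subst hb
        obtain ⟨ht, hc⟩ := ih a (by rw [hsp])
        subst ht hd
        exact ⟨rfl, by simp [hc]; exact fun hh => absurd hh.symm hx⟩

theorem pvSplit1_pair (c : Char) : ∀ (e l d : List Char),
    pvSplit1 c e = [l, d] → e = l ++ c :: d ∧ c ∉ l ∧ c ∉ d := by
  intro e
  induction e with
  | nil => intro l d h; simp [pvSplit1] at h
  | cons x t ih =>
    intro l d h
    by_cases hx : x = c
    · subst hx
      rw [show pvSplit1 x (x :: t) = [] :: pvSplit1 x t from by simp [pvSplit1]] at h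
      injection h with h1 h2
      obtain ⟨ht, hd⟩ := pvSplit1_singleton x t d h2
      subst ht
      exact ⟨by simp [← h1], by simp [← h1], hd⟩
    · simp only [pvSplit1, if_neg hx] at h
      cases hsp : pvSplit1 c t with
      | nil => exact absurd hsp (pvSplit1_ne_nil c t)
      | cons a b =>
        rw [hsp] at h
        simp only [List.modifyHead, List.cons.injEq] at h
        obtain ⟨h1, h2⟩ := h
        have hb : b = [d] := by
          cases b with
          | nil => simp at h2
          | cons u v => simpa using h2
        subst hb
        obtain ⟨ht, hcl, hcd⟩ := ih a d (by rw [hsp])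
        subst ht
        refine ⟨by simp [← h1], ?_, hcd⟩
        rw [← h1]
        simp [hcl]
        exact fun hh => absurd hh.symm hx

theorem pvSplitOn_go_eq (c : Char) (fuel : Nat) (l cur : List Char) (acc : List (List Char))
    (h : l.length < fuel) :
    PySem.Chars.splitOn.go [c] fuel l cur acc
      = acc.reverse ++ (pvSplit1 c l).modifyHead (cur.reverse ++ ·) := by
  induction fuel generalizing l cur acc with
  | zero => omega
  | succ f ih =>
    cases l with
    | nil =>
      simp [PySem.Chars.splitOn.go, pvSplit1]
    | cons x t =>
      rw [PySem.Chars.splitOn.go]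
      by_cases hx : x = c
      · subst hx
        have hp : List.isPrefixOf [x] (x :: t) = true := by simp [List.isPrefixOf]
        rw [if_pos hp]
        have hd : List.drop (List.length [x]) (x :: t) = t := rfl
        rw [hd, ih t [] (cur.reverse :: acc) (by simpa using Nat.lt_of_succ_lt_succ h)]
        simp only [pvSplit1]
        cases pvSplit1 x t <;> simp
      · have hp : List.isPrefixOf [c] (x :: t) = true ↔ c = x := by simp [List.isPrefixOf]
        rw [if_neg (by simp [hp]; exact fun hh => absurd hh.symm hx)]
        rw [ih t (x :: cur) acc (by simpa using Nat.lt_of_succ_lt_succ h)]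
        simp only [pvSplit1, if_neg hx]
        cases hsp : pvSplit1 c t with
        | nil => exact absurd hsp (pvSplit1_ne_nil c t)
        | cons a b => simp

theorem pvSplitOn_eq (c : Char) (l : List Char) :
    PySem.Chars.splitOn l [c] = pvSplit1 c l := by
  rw [PySem.Chars.splitOn, pvSplitOn_go_eq c (l.length + 1) l [] [] (by omega)]
  cases h : pvSplit1 c l with
  | nil => exact absurd h (pvSplit1_ne_nil c l)
  | cons a b => simp

theorem pvSplit1_len_two (c : Char) (e : List Char) (hm : c ∈ e) :
    2 ≤ (pvSplit1 c e).length := by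
  induction e with
  | nil => simp at hm
  | cons x t ih =>
    by_cases hx : x = c
    · subst hx
      have := List.length_pos_iff.mpr (pvSplit1_ne_nil x t)
      simp [pvSplit1]
      omega
    · have hm' : c ∈ t := by
        rcases List.mem_cons.mp hm with h | h
        · exact absurd h.symm hx
        · exact h
      simp only [pvSplit1, if_neg hx]
      cases h : pvSplit1 c t with
      | nil => exact absurd h (pvSplit1_ne_nil c t)
      | cons a b =>
        have := ih hm'
        rw [h] at this
        simpa using this

theorem pvIsIn_singleton (c : Char) (e : List Char) :
    PySem.Chars.isIn [c] e = true ↔ c ∈ e := by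
  rw [PySem.Chars.isIn_iff_infix]
  constructor
  · intro h
    exact h.sublist.mem (by simp)
  · intro h
    obtain ⟨s, t, rfl⟩ := List.append_of_mem h
    exact ⟨s, t, by simp⟩

theorem pvLoopA_spec (e d : List Char)
    (hsp : PySem.List.pyGetD (PySem.Chars.splitOn e ['@']) 1 [] = d) :
    ∀ (l' : List Char) (j : Nat) (acc : List Char), '@' ∉ l' →
      e.drop j = l' ++ '@' :: d →
      pvLoopA e (PySem.List.enumerate (l' ++ '@' :: d) (j : Int)) acc
        = acc ++ (l'.takeWhile (fun x => x ≠ '+')).filter (fun x => x ≠ '.') ++ '@' :: d := by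
  intro l'
  induction l' with
  | nil =>
    intro j acc _ hdrop
    simp only [List.nil_append, PySem.List.enumerate_cons]
    rw [pvLoopA]
    rw [if_neg (by simp)]
    rw [if_pos rfl]
    rw [PySem.List.slice_from_natCast, hdrop]
    simp
  | cons x t ih =>
    intro j acc hmem hdrop
    have hx : x ≠ '@' := fun h => hmem (h ▸ List.mem_cons_self)
    have hmem' : '@' ∉ t := fun h => hmem (List.mem_cons_of_mem _ h)
    have hdrop' : e.drop (j + 1) = t ++ '@' :: d := by
      have : e.drop (j+1) = (e.drop j).drop 1 := by
        rw [List.drop_drop]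
      rw [this, hdrop]
      simp
    simp only [List.cons_append, PySem.List.enumerate_cons]
    by_cases h1 : x ≠ '.' ∧ x ≠ '+'
    · rw [pvLoopA, if_pos ⟨h1.1, h1.2, hx⟩]
      have hcast : (j : Int) + 1 = ((j + 1 : Nat) : Int) := by push_cast; ring
      rw [hcast, ih (j+1) (acc ++ [x]) hmem' hdrop']
      simp [h1.2, h1.1]
    · by_cases h2 : x = '.'
      · subst h2
        rw [pvLoopA, if_neg (by simp), if_neg (by simp), if_pos rfl]
        have hcast2 : (j : Int) + 1 = ((j + 1 : Nat) : Int) := by push_cast; ring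
        rw [hcast2, ih (j+1) acc hmem' hdrop']
        simp
      · have h3 : x = '+' := by
          rcases not_and_or.mp h1 with h | h
          · exact absurd (not_not.mp h) h2
          · exact not_not.mp h
        subst h3
        rw [pvLoopA, if_neg (by simp), if_neg (by simp), if_neg (by simp)]
        rw [hsp]
        simp


theorem pyGetD_cons0 {a : List Char} {t : List (List Char)} : PySem.List.pyGetD (a :: t) 0 [] = a := by simp [PySem.List.pyGetD, PySem.List.pyGet?, PySem.List.pyIdx?]
theorem pyGetD_cons1 {a b : List Char} {t : List (List Char)} : PySem.List.pyGetD (a :: b :: t) 1 [] = b := by simp [PySem.List.pyGetD, PySem.List.pyGet?, PySem.List.pyIdx?]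

theorem pvPurified_eq (e : List Char) (h1 : PySem.Chars.isIn ['@'] e = true)
    (h2 : ¬ (PySem.Chars.splitOn e ['@']).length > 2) :
    pvLoopA e (PySem.List.enumerate e 0) []
      = PySem.Chars.replace
          (PySem.List.pyGetD (PySem.Chars.splitOn (PySem.List.pyGetD (PySem.Chars.splitOn e ['@']) 0 []) ['+']) 0 []) ['.'] []
        ++ '@' :: PySem.List.pyGetD (PySem.Chars.splitOn e ['@']) 1 [] := by
  have hmem : '@' ∈ e := (pvIsIn_singleton '@' e).mp h1
  have hlen2 := pvSplit1_len_two '@' e hmem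
  simp only [pvSplitOn_eq] at h2 ⊢
  obtain ⟨a, b, hab⟩ : ∃ a b, pvSplit1 '@' e = [a, b] := by
    cases hsp : pvSplit1 '@' e with
    | nil => exact absurd hsp (pvSplit1_ne_nil '@' e)
    | cons a t =>
      cases t with
      | nil => rw [hsp] at hlen2; simp at hlen2
      | cons b t2 =>
        cases t2 with
        | nil => exact ⟨a, b, rfl⟩
        | cons u v => rw [hsp] at h2; simp at h2
  rw [hab, pyGetD_cons0, pyGetD_cons1]
  obtain ⟨he, hal, had⟩ := pvSplit1_pair '@' e a b hab
  -- B side: split local at '+', take head, drop dots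
  obtain ⟨t, ht⟩ := pvSplit1_head '+' a
  rw [ht, pyGetD_cons0, pvReplace_eq]
  -- A side: the character loop
  have hspd : PySem.List.pyGetD (PySem.Chars.splitOn e ['@']) 1 [] = b := by
    rw [pvSplitOn_eq, hab, pyGetD_cons1]
  have := pvLoopA_spec e b hspd a 0 [] hal (by simpa using he)
  rw [he] at this ⊢
  simpa using this

theorem pvGo_eq : ∀ (toks : List (List Char)) (s : PySem.Set (List Char)),
    pvGoA toks s = pvGoB toks s := by
  intro toks
  induction toks with
  | nil => intro s; rfl
  | cons e rest ih =>
    intro s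
    rw [pvGoA, pvGoB]
    by_cases h1 : PySem.Chars.isIn ['@'] e = false
    · rw [if_pos h1, if_pos h1]
    · rw [if_neg h1, if_neg h1]
      simp only []
      by_cases h2 : (PySem.Chars.splitOn e ['@']).length > 2
      · rw [if_pos h2, if_pos h2]
      · rw [if_neg h2, if_neg h2]
        by_cases h3 : PySem.List.pyGetD (PySem.Chars.splitOn e ['@']) 0 [] = [] ∨
            PySem.List.pyGetD (PySem.Chars.splitOn e ['@']) 1 [] = []
        · rw [if_pos h3, if_pos h3]
        · rw [if_neg h3, if_neg h3]
          have hkey := pvPurified_eq e (by simpa using h1) h2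
          rw [hkey]
          by_cases hc : PySem.Set.contains s (PySem.Chars.replace
              (PySem.List.pyGetD (PySem.Chars.splitOn (PySem.List.pyGetD (PySem.Chars.splitOn e ['@']) 0 []) ['+']) 0 []) ['.'] []
            ++ '@' :: PySem.List.pyGetD (PySem.Chars.splitOn e ['@']) 1 []) = true
          · rw [if_pos hc]
            rw [show PySem.Set.add s (PySem.Chars.replace
              (PySem.List.pyGetD (PySem.Chars.splitOn (PySem.List.pyGetD (PySem.Chars.splitOn e ['@']) 0 []) ['+']) 0 []) ['.'] []
              ++ '@' :: PySem.List.pyGetD (PySem.Chars.splitOn e ['@']) 1 []) = s from by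
                unfold PySem.Set.add
                rw [if_pos hc]]
            exact ih s
          · rw [if_neg hc]
            exact ih _

-- ===== VERDICT (by name: the statement is the Claim_ definition above) =====
theorem email_count_spec : Claim_equal_email_count := by
  intro emails _
  unfold Spec_email_count email_count email_count_alt
  exact pvGo_eq _ _
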